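-- pv_equiv track=rewrite | github.com/sashank-tirumala/MBRDI_Virtual_Drive | new_road_creator.py | generate_blender_faces
-- ===== SOURCE A (Python) =====
-- def generate_blender_faces(blender_verts, lane_data):
--     no_of_lanes = len(lane_data['left'])+len(lane_data['right'])
--     i = 0
--     faces = []
--     count = 0
--     while(i<len(blender_verts)-no_of_lanes-1):
--         if(count < no_of_lanes):
--             A = i
--             B = i + 1
--             C = i + (no_of_lanes+1) + 1
--             D = i + (no_of_lanes+1)
--
--             face = [A,B,C,D]
--             faces.append(face)
--             count = count + 1
--         else:
--             count = 0
--         i +=1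
--     return faces
-- ===== SOURCE B (Python) =====
-- def generate_blender_faces(blender_verts, lane_data):
--     # Closed form: compute the number of faces once, then map each face index f
--     # to its top-left vertex v = f + f // (W-1) arithmetically (no skip counter).
--     W = len(lane_data['left']) + len(lane_data['right']) + 1
--     limit = len(blender_verts) - W
--     n = (limit // W) * (W - 1) + min(limit % W, W - 1)
--     faces = []
--     for f in range(n):
--         v = f + f // (W - 1)
--         faces.append([v, v + 1, v + W + 1, v + W])
--     return faces
-- ===== Notes on version B (the rewrite author's own statement) =====
-- stated objective: alternative
-- what changed: Replaces A's skip-counter scan over vertex indices with a closed form: the number of faces n = (limit//W)*(W-1) + min(limit%W, W-1) is computed once, and each face index f is mapped arithmetically to its top-left vertex v = f + f//(W-1), so no index is ever visited and skipped.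
import Mathlib
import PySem

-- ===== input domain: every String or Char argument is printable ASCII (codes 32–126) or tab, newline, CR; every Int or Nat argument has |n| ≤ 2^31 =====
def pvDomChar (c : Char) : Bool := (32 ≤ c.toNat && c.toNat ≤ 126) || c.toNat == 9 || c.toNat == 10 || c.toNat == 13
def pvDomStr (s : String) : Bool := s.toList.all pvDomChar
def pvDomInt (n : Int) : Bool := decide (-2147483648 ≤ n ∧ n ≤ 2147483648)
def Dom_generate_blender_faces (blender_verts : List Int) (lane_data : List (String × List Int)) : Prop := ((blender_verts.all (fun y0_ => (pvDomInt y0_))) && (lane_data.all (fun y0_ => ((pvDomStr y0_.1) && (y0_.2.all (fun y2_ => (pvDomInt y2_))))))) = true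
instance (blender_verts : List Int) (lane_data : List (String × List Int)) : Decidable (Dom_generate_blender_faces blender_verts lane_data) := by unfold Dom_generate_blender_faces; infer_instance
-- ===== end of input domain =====

-- B replaces A's skip-counter scan with a closed form: the face count is computed
-- once and each face index is mapped arithmetically to its top-left vertex.

-- ===== PORT A =====
-- the while loop of A: i counter, count resets after no_of_lanes appends
def pvALoop (L limit i count : Int) (faces : List (List Int)) : List (List Int) :=
  if i < limit then
    if count < L then
      pvALoop L limit (i + 1) (count + 1) (faces ++ [[i, i + 1, i + (L + 1) + 1, i + (L + 1)]])
    else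
      pvALoop L limit (i + 1) 0 faces
  else faces
termination_by (limit - i).toNat
decreasing_by all_goals omega

def generate_blender_faces (blender_verts : List Int) (lane_data : List (String × List Int)) : List (List Int) :=
  -- lane_data['left'] / ['right']: first-match association-list lookup; a missing
  -- key is a Python KeyError, excluded by Pre_ (the [] default is never claimed about)
  match lane_data.lookup "left", lane_data.lookup "right" with
  | some l, some r =>
      pvALoop ((l.length : Int) + (r.length : Int))
        ((blender_verts.length : Int) - ((l.length : Int) + (r.length : Int)) - 1) 0 0 []
  | _, _ => []

-- ===== PORT B =====
def generate_blender_faces_alt (blender_verts : List Int) (lane_data : List (String × List Int)) : List (List Int) :=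
  match lane_data.lookup "left" with
  | none => []
  | some l =>
    match lane_data.lookup "right" with
    | none => []
    | some r =>
      let W : Int := (l.length : Int) + (r.length : Int) + 1
      let limit : Int := (blender_verts.length : Int) - W
      let n : Int := PySem.Int.floordiv limit W * (W - 1) + min (PySem.Int.mod limit W) (W - 1)
      (PySem.List.pyRange 0 n 1).foldl
        (fun faces f =>
          let v := f + PySem.Int.floordiv f (W - 1)
          faces ++ [[v, v + 1, v + W + 1, v + W]]) []

-- ===== PRECONDITION & SPEC =====
-- Pre_ excludes lane_data without a 'left' or 'right' key, where both A and B raise KeyError.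
def Pre_generate_blender_faces (blender_verts : List Int) (lane_data : List (String × List Int)) : Prop :=
  (lane_data.lookup "left").isSome = true ∧ (lane_data.lookup "right").isSome = true
instance (blender_verts : List Int) (lane_data : List (String × List Int)) : Decidable (Pre_generate_blender_faces blender_verts lane_data) := by unfold Pre_generate_blender_faces; infer_instance

def pvWitness_generate_blender_faces : List Int × (List (String × List Int)) :=
  ([0, 1, 2, 3, 4, 5, 6, 7], [("left", [1]), ("right", [2])])

def Spec_generate_blender_faces (blender_verts : List Int) (lane_data : List (String × List Int)) (out : List (List Int)) : Prop := out = generate_blender_faces_alt blender_verts lane_data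
instance (blender_verts : List Int) (lane_data : List (String × List Int)) (out : List (List Int)) : Decidable (Spec_generate_blender_faces blender_verts lane_data out) := by unfold Spec_generate_blender_faces; infer_instance

-- ===== CLAIM =====
def Claim_equal_generate_blender_faces : Prop := ∀ (blender_verts : List Int) (lane_data : List (String × List Int)), Dom_generate_blender_faces blender_verts lane_data → Pre_generate_blender_faces blender_verts lane_data → Spec_generate_blender_faces blender_verts lane_data (generate_blender_faces blender_verts lane_data)

-- ===== LEMMAS AND PROOFS =====

-- quad with top-left vertex v (lane count L, row width L+1)
def pvQ (L v : Int) : List Int := [v, v + 1, v + (L + 1) + 1, v + (L + 1)]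

-- the faces A emits from index i with counter c, fuel = steps left
def pvSpecF (L : Int) : Nat → Int → Int → List (List Int)
  | 0, _, _ => []
  | f + 1, i, c =>
      if c < L then pvQ L i :: pvSpecF L f (i + 1) (c + 1)
      else pvSpecF L f (i + 1) 0

theorem pvALoop_eq (L limit : Int) : ∀ (fuel : Nat) (i c : Int) (faces : List (List Int)),
    fuel = (limit - i).toNat →
    pvALoop L limit i c faces = faces ++ pvSpecF L fuel i c := by
  intro fuel
  induction fuel with
  | zero =>
      intro i c faces h
      rw [pvALoop]
      simp only [pvSpecF, List.append_nil]
      rw [if_neg (by omega)]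
  | succ f ih =>
      intro i c faces h
      rw [pvALoop, if_pos (by omega)]
      by_cases hc : c < L
      · rw [if_pos hc, ih _ _ _ (by omega)]
        simp [pvSpecF, hc, pvQ]
      · rw [if_neg hc, ih _ _ _ (by omega)]
        simp [pvSpecF, hc]

theorem pvSpecF_zero (L : Int) (hL : L ≤ 0) : ∀ (k : Nat) (i : Int), pvSpecF L k i 0 = [] := by
  intro k
  induction k with
  | zero => intro i; rfl
  | succ k ih => intro i; simp only [pvSpecF, if_neg (by omega : ¬ (0:Int) < L)]; exact ih _

-- a run of k consecutive appends while the counter stays below L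
theorem pvRun (L : Int) : ∀ (k : Nat) (i c : Int), (k : Int) + c ≤ L →
    pvSpecF L k i c = (List.range k).map (fun (j : Nat) => pvQ L (i + (j : Int))) := by
  intro k
  induction k with
  | zero => intro i c _; simp [pvSpecF]
  | succ k ih =>
      intro i c h
      push_cast at h
      simp only [pvSpecF, if_pos (by omega : c < L)]
      rw [ih (i + 1) (c + 1) (by omega), List.range_succ_eq_map]
      simp only [List.map_cons, List.map_map]
      congr 1
      · exact congrArg (pvQ L) (by push_cast; omega)
      · apply List.map_congr_left
        intro j _
        simp only [Function.comp]
        exact congrArg (pvQ L) (by push_cast; omega)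

-- one full row of A's scan: j more appends before the reset step
theorem pvSpecF_row_aux (L : Int) : ∀ (j : Nat) (d i : Int), (j : Int) ≤ L → (j : Int) + 1 ≤ d →
    pvSpecF L d.toNat i (L - j) =
      (List.range j).map (fun (k : Nat) => pvQ L (i + (k : Int))) ++ pvSpecF L (d - j - 1).toNat (i + j + 1) 0 := by
  intro j
  induction j with
  | zero =>
      intro d i _ hd
      have h1 : d.toNat = (d - 1).toNat + 1 := by omega
      rw [h1]
      simp only [pvSpecF, if_neg (by omega : ¬ L - (0:Nat) < L)]
      have h2 : d - (0:Nat) - 1 = d - 1 := by push_cast; ring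
      have h3 : i + (0:Nat) + 1 = i + 1 := by push_cast; ring
      rw [h2, h3]
      simp
  | succ j ih =>
      intro d i hj hd
      push_cast at hj hd
      have h1 : d.toNat = (d - 1).toNat + 1 := by omega
      rw [h1]
      simp only [pvSpecF, if_pos (by push_cast; omega : L - ((j:Nat)+1:Nat) < L)]
      have harg : L - ((j:Nat)+1:Nat) + 1 = L - j := by push_cast; ring
      rw [harg, ih (d - 1) (i + 1) (by omega) (by omega), List.range_succ_eq_map]
      simp only [List.map_cons, List.map_map]
      have e1 : d - 1 - j - 1 = d - ((j:Nat)+1:Nat) - 1 := by push_cast; ring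
      have e2 : i + 1 + j + 1 = i + ((j:Nat)+1:Nat) + 1 := by push_cast; ring
      rw [e1, e2]
      simp only [List.cons_append]
      congr 1
      · exact congrArg (pvQ L) (by push_cast; omega)
      · congr 1
        apply List.map_congr_left
        intro k _
        simp only [Function.comp]
        exact congrArg (pvQ L) (by push_cast; omega)

theorem pvSpecF_block (L : Int) (hL : 0 ≤ L) (d i : Int) (hd : L + 1 ≤ d) :
    pvSpecF L d.toNat i 0 =
      (List.range L.toNat).map (fun (k : Nat) => pvQ L (i + (k : Int))) ++ pvSpecF L (d - (L + 1)).toNat (i + (L + 1)) 0 := by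
  have h := pvSpecF_row_aux L L.toNat d i (by omega) (by omega)
  have h0 : L - (L.toNat : Int) = 0 := by omega
  have h1 : d - (L.toNat : Int) - 1 = d - (L + 1) := by omega
  have h2 : i + (L.toNat : Int) + 1 = i + (L + 1) := by omega
  rw [h0, h1, h2] at h
  exact h

-- core: B's closed-form enumeration equals A's scan result (ediv normal form)
theorem pvCore (L : Int) (hL : 1 ≤ L) : ∀ (n : Nat) (d base : Int), n = d.toNat →
    (List.range (d - d / (L + 1)).toNat).map (fun (k : Nat) => pvQ L (base + ((k : Int) + (k : Int) / L))) =
      pvSpecF L d.toNat base 0 := by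
  intro n
  induction n using Nat.strong_induction_on with
  | _ n ih =>
      intro d base hn
      have hW : (0:Int) < L + 1 := by omega
      have hqr : (L + 1) * (d / (L + 1)) + d % (L + 1) = d := by
        have h := Int.emod_add_ediv_mul d (L + 1)
        nlinarith [h]
      have hr0 : 0 ≤ d % (L + 1) := Int.emod_nonneg d (by omega)
      have hr1 : d % (L + 1) < L + 1 := Int.emod_lt_of_pos d hW
      by_cases hd0 : d ≤ 0
      · -- no faces
        have hq : d ≤ d / (L + 1) := by
          rw [Int.le_ediv_iff_mul_le hW]
          nlinarith
        have : (d - d / (L + 1)).toNat = 0 := by omega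
        rw [this]
        have hdt : d.toNat = 0 := by omega
        rw [hdt]
        simp [pvSpecF]
      · by_cases hdL : d ≤ L
        · -- single partial row
          have hq : d / (L + 1) = 0 := Int.ediv_eq_zero_of_lt (by omega) (by omega)
          rw [hq]
          have hr : (d - 0).toNat = d.toNat := by omega
          rw [hr, pvRun L d.toNat base 0 (by omega)]
          apply List.map_congr_left
          intro k hk
          have hk' : (k : Int) < L := by
            have := List.mem_range.mp hk; omega
          have : (k : Int) / L = 0 := Int.ediv_eq_zero_of_lt (by omega) hk'
          rw [this]
          exact congrArg (pvQ L) (by omega)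
        · -- full row plus recursion
          have hdW : L + 1 ≤ d := by omega
          have hq1 : 1 ≤ d / (L + 1) := by
            rw [Int.le_ediv_iff_mul_le hW]; omega
          set q := d / (L + 1) with hqdef
          have hqd : q ≤ d := by nlinarith
          have hN : L ≤ d - q := by nlinarith
          -- count of the rest: (d - (L+1)) / (L+1) = q - 1
          have hq' : (d - (L + 1)) / (L + 1) = q - 1 := by
            have := Int.add_mul_ediv_right d (-1) (show (L:Int) + 1 ≠ 0 by omega)
            have e : d + -1 * (L + 1) = d - (L + 1) := by ring
            rw [e] at this
            omega
          have hsplit : (d - q).toNat = L.toNat + (d - q - L).toNat := by omega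
          rw [hsplit, List.range_add, List.map_append, List.map_map]
          rw [pvSpecF_block L (by omega) d base hdW]
          congr 1
          · -- first full row
            apply List.map_congr_left
            intro k hk
            have hk' : (k : Int) < L := by
              have := List.mem_range.mp hk; omega
            have : (k : Int) / L = 0 := Int.ediv_eq_zero_of_lt (by omega) hk'
            rw [this]
            exact congrArg (pvQ L) (by omega)
          · -- remaining rows, via the induction hypothesis at d' = d - (L+1)
            have hih := ih ((d - (L + 1)).toNat) (by omega) (d - (L + 1)) (base + (L + 1)) rfl
            rw [hq'] at hih
            have e1 : (d - (L + 1) - (q - 1)).toNat = (d - q - L).toNat := by omega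
            rw [e1] at hih
            rw [← hih]
            apply List.map_congr_left
            intro k _
            simp only [Function.comp]
            have hdiv : ((L.toNat : Int) + (k : Int)) / L = (k : Int) / L + 1 := by
              have := Int.add_mul_ediv_right (k : Int) 1 (show (L:Int) ≠ 0 by omega)
              have e : (k : Int) + 1 * L = (L.toNat : Int) + (k : Int) := by push_cast; omega
              rw [e] at this
              omega
            rw [show ((L.toNat + k : Nat) : Int) = (L.toNat : Int) + (k : Int) by push_cast; ring, hdiv]
            exact congrArg (pvQ L) (by omega)

-- ===== VERDICT (by name: the statement is the Claim_ definition above) =====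
theorem generate_blender_faces_spec : Claim_equal_generate_blender_faces := by
  intro bv ld _ hpre
  obtain ⟨hl, hr⟩ := hpre
  obtain ⟨l, hl'⟩ := Option.isSome_iff_exists.mp hl
  obtain ⟨r, hr'⟩ := Option.isSome_iff_exists.mp hr
  unfold Spec_generate_blender_faces generate_blender_faces generate_blender_faces_alt
  rw [hl', hr']
  dsimp only
  set L : Int := (l.length : Int) + (r.length : Int) with hLdef
  have hL0 : 0 ≤ L := by positivity
  set d : Int := (bv.length : Int) - (L + 1) with hddef
  have hWpos : (0:Int) < L + 1 := by omega
  -- normalise B's count to d - d/(L+1) (ediv form)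
  have hfd : PySem.Int.floordiv d (L + 1) = d / (L + 1) := PySem.Int.floordiv_eq_ediv_of_pos hWpos
  have hmd : PySem.Int.mod d (L + 1) = d % (L + 1) := PySem.Int.mod_eq_emod_of_pos hWpos
  have hr1 : d % (L + 1) < L + 1 := Int.emod_lt_of_pos d hWpos
  have hmin : min (d % (L + 1)) L = d % (L + 1) := min_eq_left (by omega)
  have hqr : (L + 1) * (d / (L + 1)) + d % (L + 1) = d := by
    have h := Int.emod_add_ediv_mul d (L + 1)
    nlinarith [h]
  have hcnt : d / (L + 1) * (L + 1 - 1) + min (PySem.Int.mod d (L + 1)) (L + 1 - 1) = d - d / (L + 1) := by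
    rw [show L + 1 - 1 = L by ring, hmd, hmin]
    nlinarith
  have hsub0 : d - 0 = d := by ring
  -- A side
  rw [pvALoop_eq L (((bv.length : Int)) - L - 1) _ 0 0 [] rfl]
  have hdA : ((bv.length : Int)) - L - 1 = d := by rw [hddef]; ring
  rw [hdA]
  simp only [List.nil_append, sub_zero]
  -- B side: fold of appends = map over the range
  have hfold : ∀ (g : Int → List Int) (xs : List Int) (acc : List (List Int)),
      xs.foldl (fun fs f => fs ++ [g f]) acc = acc ++ xs.map g := by
    intro g xs
    induction xs with
    | nil => intro acc; simp
    | cons x xs ihx => intro acc; simp [ihx]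
  rw [hfd, hcnt, hfold]
  simp only [List.nil_append]
  by_cases hL1 : 1 ≤ L
  · -- lanes present: apply the core lemma at base = 0
    rw [← pvCore L hL1 d.toNat d 0 rfl]
    rw [PySem.List.pyRange_one, List.map_map]
    rw [show (d - d / (L + 1) - 0).toNat = (d - d / (L + 1)).toNat by omega]
    apply List.map_congr_left
    intro k _
    simp only [Function.comp]
    have hk0 : (0:Int) ≤ (k : Int) := by positivity
    have hfk : PySem.Int.floordiv (0 + (k : Int)) L = (k : Int) / L := by
      rw [show (0:Int) + (k : Int) = (k : Int) by ring]
      exact PySem.Int.floordiv_eq_ediv_of_pos (by omega)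
    rw [show (L:Int) + 1 - 1 = L from by ring, hfk]
    simp [pvQ]
  · -- no lanes: both sides are empty
    have hLeq : L = 0 := by omega
    rw [pvSpecF_zero L (by omega) d.toNat 0]
    have hq : d / (L + 1) = d := by rw [hLeq]; simp
    rw [hq]
    simp
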